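-- pv_equiv track=rewrite | github.com/sungin95/TIL | python/코드테스트(연습)/백준/23y01m/체육복.py | solution
-- ===== SOURCE A (Python) =====
-- def solution(n, lost, reserve):
--     lost_ = set(lost)
--     reserve_ = set(reserve)
--     aa = lost_ & reserve_
--     for a in aa:
--         lost.remove(a)
--         reserve.remove(a)
--     cnt = [n - len(lost)]
--
--     def max_return(lost, reserve):
--         for l in lost:
--             ll = l + 1
--             if ll in reserve:
--                 lost.remove(l)
--                 reserve.remove(ll)
--                 max_return(lost, reserve)
--                 if cnt[0] < n - len(lost):
--                     cnt[0] = n - len(lost)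
--                 lost.append(l)
--                 reserve.append(ll)
--             ll = l - 1
--             if ll in reserve:
--                 lost.remove(l)
--                 reserve.remove(ll)
--                 max_return(lost, reserve)
--                 if cnt[0] < n - len(lost):
--                     cnt[0] = n - len(lost)
--                 lost.append(l)
--                 reserve.append(ll)
--
--     max_return(lost, reserve)
--     answer = cnt[0]
--     return answer
-- ===== SOURCE B (Python) =====
-- def solution(n, lost, reserve):
--     lost2 = list(lost)
--     reserve2 = list(reserve)
--     for v in set(lost) & set(reserve):
--         lost2.remove(v)
--         reserve2.remove(v)
--     miss = 0
--     for v in sorted(lost2):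
--         if v - 1 in reserve2:
--             reserve2.remove(v - 1)
--         elif v + 1 in reserve2:
--             reserve2.remove(v + 1)
--         else:
--             miss += 1
--     return n - miss
-- ===== Notes on version B (the rewrite author's own statement) =====
-- stated objective: faster
-- what changed: A finds the best lending assignment by an exponential backtracking search that tries every sequence of (lost, spare) pairings with in-place list mutation; B removes the overlaps, sorts the remaining lost list once and does a single greedy pass lending v-1 first, then v+1 (proved to attain the same maximum matching).
import Mathlib
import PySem

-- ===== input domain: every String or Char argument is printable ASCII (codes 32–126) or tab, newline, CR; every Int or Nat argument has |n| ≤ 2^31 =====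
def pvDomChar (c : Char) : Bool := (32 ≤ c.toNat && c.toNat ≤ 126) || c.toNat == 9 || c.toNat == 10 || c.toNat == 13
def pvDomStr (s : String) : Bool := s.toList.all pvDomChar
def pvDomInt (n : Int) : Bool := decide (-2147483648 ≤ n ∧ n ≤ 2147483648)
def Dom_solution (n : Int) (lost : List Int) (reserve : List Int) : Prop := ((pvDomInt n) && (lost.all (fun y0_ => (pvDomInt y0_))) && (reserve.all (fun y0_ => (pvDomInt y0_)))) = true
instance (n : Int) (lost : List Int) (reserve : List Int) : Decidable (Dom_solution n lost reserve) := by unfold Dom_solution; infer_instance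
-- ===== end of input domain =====

-- B replaces A's exponential backtracking search by a sort-then-greedy lending pass (same return
-- value, proved via the maximum-matching characterisation of both; A also mutates its list arguments
-- in place, which B does not — the equivalence proved here is about the return value only).

-- ===== PORT A =====
-- A's `if cnt[0] < n - len(lost): cnt[0] = n - len(lost)` followed by re-appending the lent pair.
def pvAfter (n : Int) (l r : Int) (t : List Int × List Int × Int) : List Int × List Int × Int :=
  (t.1 ++ [l], t.2.1 ++ [r], if t.2.2 < n - t.1.length then n - t.1.length else t.2.2)

-- A's recursive `max_return`: the `for l in lost` loop walks by index i with bound k (CPython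
-- iterates by index over the mutating list; the loop body restores the list's length, so the bound
-- stays lost.length); `recur` is the recursive call one level down, driven by the fuel of pvMaxRet
-- below, which always equals the current lost-list length (each recursive call removes one element,
-- so the fuel-0 fallback only ever fires on an empty list, where the loop body does nothing anyway).
def pvLoopF (n : Int) (recur : List Int → List Int → Int → List Int × List Int × Int) :
    Nat → Nat → List Int → List Int → Int → List Int × List Int × Int
  | 0, _, lost, reserve, cnt => (lost, reserve, cnt)
  | k+1, i, lost, reserve, cnt =>
    if hi : i < lost.length then
      let l := lost[i]
      let s1 : List Int × List Int × Int :=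
        if (l + 1) ∈ reserve then
          pvAfter n l (l+1) (recur ((PySem.List.remove? lost l).getD lost)
            ((PySem.List.remove? reserve (l+1)).getD reserve) cnt)
        else (lost, reserve, cnt)
      let s2 : List Int × List Int × Int :=
        if (l - 1) ∈ s1.2.1 then
          pvAfter n l (l-1) (recur ((PySem.List.remove? s1.1 l).getD s1.1)
            ((PySem.List.remove? s1.2.1 (l-1)).getD s1.2.1) s1.2.2)
        else s1
      pvLoopF n recur k (i+1) s2.1 s2.2.1 s2.2.2
    else (lost, reserve, cnt)

def pvMaxRet (n : Int) : Nat → List Int → List Int → Int → List Int × List Int × Int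
  | 0, lost, reserve, cnt => (lost, reserve, cnt)
  | d+1, lost, reserve, cnt => pvLoopF n (pvMaxRet n d) lost.length 0 lost reserve cnt

-- `for a in set(lost) & set(reserve): lost.remove(a); reserve.remove(a)` — removals of distinct
-- values commute (List.erase_comm), so the result does not depend on the set's iteration order.
def pvDedup (lost reserve : List Int) : List Int × List Int :=
  (PySem.Set.inter (PySem.Set.ofList lost) (PySem.Set.ofList reserve)).foldl
    (fun (p : List Int × List Int) a =>
      ((PySem.List.remove? p.1 a).getD p.1, (PySem.List.remove? p.2 a).getD p.2)) (lost, reserve)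

def solution (n : Int) (lost : List Int) (reserve : List Int) : Int :=
  let p := pvDedup lost reserve
  (pvMaxRet n p.1.length p.1 p.2 (n - p.1.length)).2.2

-- ===== PORT B =====
def pvDedupB (lost reserve : List Int) : List Int × List Int :=
  (PySem.Set.inter (PySem.Set.ofList lost) (PySem.Set.ofList reserve)).foldl
    (fun (p : List Int × List Int) a =>
      ((PySem.List.remove? p.1 a).getD p.1, (PySem.List.remove? p.2 a).getD p.2)) (lost, reserve)

-- greedy pass of Source B: walk the sorted lost list, lend v-1 first, else v+1, else count a miss
def solution_alt (n : Int) (lost : List Int) (reserve : List Int) : Int :=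
  let p := pvDedupB lost reserve
  let st := (PySem.List.sorted p.1 (fun x => x) false).foldl
    (fun (st : List Int × Int) v =>
      if (v - 1) ∈ st.1 then ((PySem.List.remove? st.1 (v-1)).getD st.1, st.2)
      else if (v + 1) ∈ st.1 then ((PySem.List.remove? st.1 (v+1)).getD st.1, st.2)
      else (st.1, st.2 + 1)) (p.2, (0 : Int))
  n - st.2

-- ===== PRECONDITION & SPEC =====
def Spec_solution (n : Int) (lost : List Int) (reserve : List Int) (out : Int) : Prop := out = solution_alt n lost reserve
instance (n : Int) (lost : List Int) (reserve : List Int) (out : Int) : Decidable (Spec_solution n lost reserve out) := by unfold Spec_solution; infer_instance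

-- ===== CLAIM (what is proved, stated in full; the proofs are below) =====
def Claim_equal_solution : Prop := ∀ (n : Int) (lost : List Int) (reserve : List Int), Dom_solution n lost reserve → Spec_solution n lost reserve (solution n lost reserve)

-- ===== LEMMAS AND PROOFS =====

def pvEdged (l : Int) (R : List Int) : Prop := (l + 1) ∈ R ∨ (l - 1) ∈ R

theorem ms_cons_le_erase {a : Int} {s t : Multiset Int} (h : a ::ₘ s ≤ t) : s ≤ t.erase a := by
  rw [Multiset.le_iff_count] at h ⊢
  intro b
  have hb := h b
  by_cases hba : b = a
  · subst hba
    have ha := h b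
    rw [Multiset.count_cons_self] at ha
    rw [Multiset.count_erase_self]
    omega
  · rw [Multiset.count_cons_of_ne hba] at hb
    rw [Multiset.count_erase_of_ne hba]
    exact hb

theorem ms_le_erase_of_count_zero {a : Int} {s t : Multiset Int} (h : s ≤ t)
    (h0 : s.count a = 0) : s ≤ t.erase a := by
  rw [Multiset.le_iff_count] at h ⊢
  intro b
  by_cases hba : b = a
  · subst hba; simp [h0]
  · rw [Multiset.count_erase_of_ne hba]; exact h b

theorem ms_le_of_le_cons_count_zero {a : Int} {s t : Multiset Int} (h : s ≤ a ::ₘ t)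
    (h0 : s.count a = 0) : s ≤ t := by
  rw [Multiset.le_iff_count] at h ⊢
  intro b
  have hb := h b
  by_cases hba : b = a
  · subst hba; simp [h0]
  · rwa [Multiset.count_cons_of_ne hba] at hb

theorem ms_cons_le_of_lt {a : Int} {s t : Multiset Int} (h : s ≤ t)
    (hc : s.count a < t.count a) : a ::ₘ s ≤ t := by
  rw [Multiset.le_iff_count] at h ⊢
  intro b
  by_cases hba : b = a
  · subst hba; rw [Multiset.count_cons_self]; omega
  · rw [Multiset.count_cons_of_ne hba]; exact h b

def mu : List Int → List Int → Nat
  | [], _ => 0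
  | l :: L, R =>
    max (mu L R)
      (max (if (l+1) ∈ R then mu L (R.erase (l+1)) + 1 else 0)
           (if (l-1) ∈ R then mu L (R.erase (l-1)) + 1 else 0))

def IsM (P : Multiset (Int × Int)) (L R : List Int) : Prop :=
  P.map Prod.fst ≤ (L : Multiset Int) ∧ P.map Prod.snd ≤ (R : Multiset Int) ∧
  ∀ p ∈ P, p.2 = p.1 + 1 ∨ p.2 = p.1 - 1

theorem mu_le_len (L R : List Int) : mu L R ≤ L.length := by
  induction L generalizing R with
  | nil => simp [mu]
  | cons l L ih =>
    simp only [mu, List.length_cons]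
    have h1 := ih R
    have h2 := ih (R.erase (l+1))
    have h3 := ih (R.erase (l-1))
    split_ifs <;> omega

theorem mu_zero {L R : List Int} (h : ∀ x ∈ L, ¬ pvEdged x R) : mu L R = 0 := by
  induction L with
  | nil => simp [mu]
  | cons l L ih =>
    have hl := h l (by simp)
    rw [pvEdged, not_or] at hl
    simp only [mu, hl.1, hl.2, if_false]
    rw [ih (fun x hx => h x (by simp [hx]))]
    simp

theorem mu_pos {L R : List Int} (h : mu L R ≠ 0) : ∃ x ∈ L, pvEdged x R := by
  by_contra hc
  push Not at hc
  exact h (mu_zero hc)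

theorem mu_ub (L R : List Int) (P : Multiset (Int × Int)) (h : IsM P L R) :
    Multiset.card P ≤ mu L R := by
  induction L generalizing R P with
  | nil =>
    obtain ⟨h1, _, _⟩ := h
    have : P.map Prod.fst = 0 := le_antisymm (by simpa using h1) (Multiset.zero_le _)
    have hP : P = 0 := by
      have := congrArg Multiset.card this
      simpa using Multiset.card_eq_zero.mp (by simpa using this)
    simp [hP, mu]
  | cons l L ih =>
    obtain ⟨h1, h2, h3⟩ := h
    by_cases hp : ∃ p ∈ P, p.1 = l
    · obtain ⟨p, hpP, hpl⟩ := hp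
      have hdecomp : P = p ::ₘ P.erase p := (Multiset.cons_erase hpP).symm
      set Q := P.erase p with hQ
      have hfst : P.map Prod.fst = l ::ₘ Q.map Prod.fst := by
        rw [hdecomp, Multiset.map_cons, hpl]
      have hsnd : P.map Prod.snd = p.2 ::ₘ Q.map Prod.snd := by
        rw [hdecomp, Multiset.map_cons]
      have hfst' : Q.map Prod.fst ≤ (L : Multiset Int) := by
        rw [hfst, ← Multiset.cons_coe] at h1
        exact (Multiset.cons_le_cons_iff l).mp h1
      have hr : p.2 ∈ R := by
        have : p.2 ∈ P.map Prod.snd := by rw [hsnd]; simp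
        simpa using Multiset.mem_of_le h2 this
      have hsnd' : Q.map Prod.snd ≤ ((R.erase p.2 : List Int) : Multiset Int) := by
        rw [← Multiset.coe_erase]
        exact ms_cons_le_erase (by rw [← hsnd]; exact h2)
      have hQM : IsM Q L (R.erase p.2) :=
        ⟨hfst', hsnd', fun q hq => h3 q (Multiset.mem_of_le (Multiset.erase_le p P) hq)⟩
      have hcard : Multiset.card P = Multiset.card Q + 1 := by
        rw [hdecomp]; simp [hQ]
      have hQle := ih (R.erase p.2) Q hQM
      rcases h3 p hpP with he | he
      · have he' : p.2 = l + 1 := by rw [he, hpl]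
        have hr' : (l + 1) ∈ R := he' ▸ hr
        have hb : mu L (R.erase (l+1)) + 1 ≤ mu (l :: L) R := by
          simp only [mu]; rw [if_pos hr']; omega
        rw [he'] at hQle
        rw [hcard]
        omega
      · have he' : p.2 = l - 1 := by rw [he, hpl]
        have hr' : (l - 1) ∈ R := he' ▸ hr
        have hb : mu L (R.erase (l-1)) + 1 ≤ mu (l :: L) R := by
          simp only [mu]; rw [if_pos hr']; split_ifs <;> omega
        rw [he'] at hQle
        rw [hcard]
        omega
    · have hcount : (P.map Prod.fst).count l = 0 := by
        rw [Multiset.count_eq_zero]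
        intro hmem
        obtain ⟨p, hpP, hpl⟩ := Multiset.mem_map.mp hmem
        exact hp ⟨p, hpP, hpl⟩
      have h1' : P.map Prod.fst ≤ (L : Multiset Int) := by
        have : P.map Prod.fst ≤ l ::ₘ (L : Multiset Int) := by rwa [Multiset.cons_coe]
        exact ms_le_of_le_cons_count_zero this hcount
      have := ih R P ⟨h1', h2, h3⟩
      calc Multiset.card P ≤ mu L R := this
        _ ≤ mu (l :: L) R := by simp only [mu]; omega

theorem max3_choice (a b c : Nat) :
    max a (max b c) = a ∨ max a (max b c) = b ∨ max a (max b c) = c := by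
  rcases max_choice a (max b c) with h | h
  · exact Or.inl h
  · rcases max_choice b c with h' | h'
    · exact Or.inr (Or.inl (h.trans h'))
    · exact Or.inr (Or.inr (h.trans h'))

theorem coe_cons_erase {l : Int} {L : List Int} (hl : l ∈ L) :
    (l ::ₘ ((L.erase l : List Int) : Multiset Int)) = (L : Multiset Int) := by
  rw [← Multiset.coe_erase]
  exact Multiset.cons_erase (by simpa using hl)

theorem mu_achieved (L R : List Int) : ∃ P, IsM P L R ∧ Multiset.card P = mu L R := by
  induction L generalizing R with
  | nil => exact ⟨0, ⟨by simp, by simp, by simp⟩, by simp [mu]⟩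
  | cons l L ih =>
    have hmu : mu (l :: L) R =
        max (mu L R) (max (if (l+1) ∈ R then mu L (R.erase (l+1)) + 1 else 0)
          (if (l-1) ∈ R then mu L (R.erase (l-1)) + 1 else 0)) := rfl
    rcases max3_choice (mu L R) (if (l+1) ∈ R then mu L (R.erase (l+1)) + 1 else 0)
        (if (l-1) ∈ R then mu L (R.erase (l-1)) + 1 else 0) with h | h | h <;> rw [← hmu] at h
    · obtain ⟨P, ⟨hf, hs, hprop⟩, hcard⟩ := ih R
      refine ⟨P, ⟨le_trans hf ?_, hs, hprop⟩, by rw [hcard, ← h]⟩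
      rw [← Multiset.cons_coe]
      exact Multiset.le_cons_self _ _
    · by_cases h1 : (l+1) ∈ R
      · rw [if_pos h1] at h
        obtain ⟨Q, ⟨hf, hs, hprop⟩, hcard⟩ := ih (R.erase (l+1))
        refine ⟨(l, l+1) ::ₘ Q, ⟨?_, ?_, ?_⟩, by simp [Multiset.card_cons, hcard, h]⟩
        · rw [Multiset.map_cons, ← Multiset.cons_coe]
          exact Multiset.cons_le_cons _ hf
        · rw [Multiset.map_cons, ← coe_cons_erase h1]
          exact Multiset.cons_le_cons _ hs
        · intro p hp
          rcases Multiset.mem_cons.mp hp with rfl | hp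
          · left; rfl
          · exact hprop p hp
      · rw [if_neg h1] at h
        refine ⟨0, ⟨by simp, by simp, by simp⟩, by simp [h]⟩
    · by_cases h1 : (l-1) ∈ R
      · rw [if_pos h1] at h
        obtain ⟨Q, ⟨hf, hs, hprop⟩, hcard⟩ := ih (R.erase (l-1))
        refine ⟨(l, l-1) ::ₘ Q, ⟨?_, ?_, ?_⟩, by simp [Multiset.card_cons, hcard, h]⟩
        · rw [Multiset.map_cons, ← Multiset.cons_coe]
          exact Multiset.cons_le_cons _ hf
        · rw [Multiset.map_cons, ← coe_cons_erase h1]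
          exact Multiset.cons_le_cons _ hs
        · intro p hp
          rcases Multiset.mem_cons.mp hp with rfl | hp
          · right; rfl
          · exact hprop p hp
      · rw [if_neg h1] at h
        refine ⟨0, ⟨by simp, by simp, by simp⟩, by simp [h]⟩

theorem mu_perm {L L' R R' : List Int} (hL : L.Perm L') (hR : R.Perm R') :
    mu L R = mu L' R' := by
  have key : ∀ (A B A' B' : List Int), A.Perm A' → B.Perm B' → mu A B ≤ mu A' B' := by
    intro A B A' B' hA hB
    obtain ⟨P, ⟨h1, h2, h3⟩, hc⟩ := mu_achieved A B
    rw [Multiset.coe_eq_coe.mpr hA] at h1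
    rw [Multiset.coe_eq_coe.mpr hB] at h2
    rw [← hc]
    exact mu_ub _ _ _ ⟨h1, h2, h3⟩
  exact le_antisymm (key _ _ _ _ hL hR) (key _ _ _ _ hL.symm hR.symm)

theorem mu_mono_pair {L R : List Int} {l r : Int} (hl : l ∈ L) (hr : r ∈ R)
    (he : r = l + 1 ∨ r = l - 1) : mu (L.erase l) (R.erase r) + 1 ≤ mu L R := by
  obtain ⟨P, ⟨h1, h2, h3⟩, hc⟩ := mu_achieved (L.erase l) (R.erase r)
  have hM : IsM ((l, r) ::ₘ P) L R := by
    refine ⟨?_, ?_, ?_⟩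
    · rw [Multiset.map_cons, ← coe_cons_erase hl]
      exact Multiset.cons_le_cons _ h1
    · rw [Multiset.map_cons, ← coe_cons_erase hr]
      exact Multiset.cons_le_cons _ h2
    · intro p hp
      rcases Multiset.mem_cons.mp hp with rfl | hp
      · exact he
      · exact h3 p hp
  have := mu_ub L R _ hM
  simp only [Multiset.card_cons, hc] at this
  omega

-- removing a matched pair (p with p.1 = l) from an optimal matching

theorem mu_remove_pair_fst {L R : List Int} {l : Int} {P : Multiset (Int × Int)}
    (hP : IsM P L R) (hc : Multiset.card P = mu L R) {p : Int × Int} (hpP : p ∈ P)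
    (hpl : p.1 = l) : mu L R = mu (L.erase l) (R.erase p.2) + 1 := by
  obtain ⟨h1, h2, h3⟩ := hP
  have hl : l ∈ L := by
    have : l ∈ P.map Prod.fst := Multiset.mem_map.mpr ⟨p, hpP, hpl⟩
    simpa using Multiset.mem_of_le h1 this
  have hr : p.2 ∈ R := by
    have : p.2 ∈ P.map Prod.snd := Multiset.mem_map.mpr ⟨p, hpP, rfl⟩
    simpa using Multiset.mem_of_le h2 this
  have hdecomp : P = p ::ₘ P.erase p := (Multiset.cons_erase hpP).symm
  set Q := P.erase p with hQ
  have hfst' : Q.map Prod.fst ≤ ((L.erase l : List Int) : Multiset Int) := by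
    rw [← Multiset.coe_erase]
    apply ms_cons_le_erase
    rw [← hpl, ← Multiset.map_cons, ← hdecomp]
    exact h1
  have hsnd' : Q.map Prod.snd ≤ ((R.erase p.2 : List Int) : Multiset Int) := by
    rw [← Multiset.coe_erase]
    apply ms_cons_le_erase
    rw [← Multiset.map_cons, ← hdecomp]
    exact h2
  have hub := mu_ub _ _ Q ⟨hfst', hsnd', fun q hq => h3 q (Multiset.mem_of_le (Multiset.erase_le p P) hq)⟩
  have he : p.2 = l + 1 ∨ p.2 = l - 1 := by
    rcases h3 p hpP with h | h
    · left; rw [h, hpl]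
    · right; rw [h, hpl]
  have hmono := mu_mono_pair hl hr he
  have hcard : Multiset.card P = Multiset.card Q + 1 := by rw [hdecomp]; simp [hQ]
  omega

theorem mu_exchange {L R : List Int} {l : Int} (hl : l ∈ L) (he : pvEdged l R) :
    ∃ r, (r = l + 1 ∨ r = l - 1) ∧ r ∈ R ∧ mu L R = mu (L.erase l) (R.erase r) + 1 := by
  obtain ⟨P, hP, hc⟩ := mu_achieved L R
  by_cases hp : ∃ p ∈ P, p.1 = l
  · obtain ⟨p, hpP, hpl⟩ := hp
    have hr : p.2 ∈ R := by
      have : p.2 ∈ P.map Prod.snd := Multiset.mem_map.mpr ⟨p, hpP, rfl⟩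
      simpa using Multiset.mem_of_le hP.2.1 this
    refine ⟨p.2, ?_, hr, mu_remove_pair_fst hP hc hpP hpl⟩
    rcases hP.2.2 p hpP with h | h
    · left; rw [h, hpl]
    · right; rw [h, hpl]
  · -- no pair uses l; pick any admissible r₀
    obtain ⟨h1, h2, h3⟩ := hP
    have hcnt : (P.map Prod.fst).count l = 0 := by
      rw [Multiset.count_eq_zero]
      intro hmem
      obtain ⟨q, hq, hql⟩ := Multiset.mem_map.mp hmem
      exact hp ⟨q, hq, hql⟩
    have main : ∀ r₀ : Int, r₀ ∈ R → (r₀ = l + 1 ∨ r₀ = l - 1) →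
        mu L R = mu (L.erase l) (R.erase r₀) + 1 := by
      intro r₀ hr0 he0
      by_cases hs : ∃ p ∈ P, p.2 = r₀
      · obtain ⟨p, hpP, hpr⟩ := hs
        have hdecomp : P = p ::ₘ P.erase p := (Multiset.cons_erase hpP).symm
        set Q := P.erase p with hQ
        have hfst' : Q.map Prod.fst ≤ ((L.erase l : List Int) : Multiset Int) := by
          rw [← Multiset.coe_erase]
          apply ms_le_erase_of_count_zero
          · exact le_trans (Multiset.map_le_map (Multiset.erase_le p P)) h1
          · have : (Q.map Prod.fst).count l ≤ (P.map Prod.fst).count l :=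
              Multiset.count_le_of_le _ (Multiset.map_le_map (Multiset.erase_le p P))
            omega
        have hsnd' : Q.map Prod.snd ≤ ((R.erase r₀ : List Int) : Multiset Int) := by
          rw [← Multiset.coe_erase]
          apply ms_cons_le_erase
          rw [← hpr, ← Multiset.map_cons, ← hdecomp]
          exact h2
        have hub := mu_ub _ _ Q ⟨hfst', hsnd', fun q hq => h3 q (Multiset.mem_of_le (Multiset.erase_le p P) hq)⟩
        have hmono := mu_mono_pair hl hr0 he0
        have hcard : Multiset.card P = Multiset.card Q + 1 := by rw [hdecomp]; simp [hQ]
        omega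
      · exfalso
        have hscnt : (P.map Prod.snd).count r₀ = 0 := by
          rw [Multiset.count_eq_zero]
          intro hmem
          obtain ⟨q, hq, hqr⟩ := Multiset.mem_map.mp hmem
          exact hs ⟨q, hq, hqr⟩
        have hM : IsM ((l, r₀) ::ₘ P) L R := by
          refine ⟨?_, ?_, ?_⟩
          · rw [Multiset.map_cons]
            apply ms_cons_le_of_lt h1
            rw [hcnt]
            have hlm : l ∈ (L : Multiset Int) := by simpa using hl
            simpa using Multiset.count_pos.mpr hlm
          · rw [Multiset.map_cons]
            apply ms_cons_le_of_lt h2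
            rw [hscnt]
            have hrm : r₀ ∈ (R : Multiset Int) := by simpa using hr0
            simpa using Multiset.count_pos.mpr hrm
          · intro p hp
            rcases Multiset.mem_cons.mp hp with rfl | hp
            · exact he0
            · exact h3 p hp
        have := mu_ub L R _ hM
        simp only [Multiset.card_cons, hc] at this
        omega
    rcases he with h | h
    · exact ⟨l + 1, Or.inl rfl, h, main _ h (Or.inl rfl)⟩
    · exact ⟨l - 1, Or.inr rfl, h, main _ h (Or.inr rfl)⟩

theorem mu_noedge {L R : List Int} {l : Int} (h1 : (l - 1) ∉ R)
    (h2 : (l + 1) ∉ R) : mu L R = mu (L.erase l) R := by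
  apply le_antisymm
  · obtain ⟨P, ⟨hf, hs, hprop⟩, hc⟩ := mu_achieved L R
    have hcnt : (P.map Prod.fst).count l = 0 := by
      rw [Multiset.count_eq_zero]
      intro hmem
      obtain ⟨p, hpP, hpl⟩ := Multiset.mem_map.mp hmem
      have hr : p.2 ∈ R := by
        have : p.2 ∈ P.map Prod.snd := Multiset.mem_map.mpr ⟨p, hpP, rfl⟩
        simpa using Multiset.mem_of_le hs this
      rcases hprop p hpP with h | h
      · exact h2 (by rwa [h, hpl] at hr)
      · exact h1 (by rwa [h, hpl] at hr)
    have hf' : P.map Prod.fst ≤ ((L.erase l : List Int) : Multiset Int) := by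
      rw [← Multiset.coe_erase]
      exact ms_le_erase_of_count_zero hf hcnt
    rw [← hc]
    exact mu_ub _ _ _ ⟨hf', hs, hprop⟩
  · obtain ⟨P, ⟨hf, hs, hprop⟩, hc⟩ := mu_achieved (L.erase l) R
    have hf' : P.map Prod.fst ≤ (L : Multiset Int) := by
      refine le_trans hf ?_
      rw [← Multiset.coe_erase]
      exact Multiset.erase_le _ _
    rw [← hc]
    exact mu_ub _ _ _ ⟨hf', hs, hprop⟩

theorem mu_min_left {L R : List Int} {l : Int} (hl : l ∈ L) (hmin : ∀ x ∈ L, l ≤ x)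
    (h1 : (l - 1) ∈ R) : mu L R = mu (L.erase l) (R.erase (l - 1)) + 1 := by
  obtain ⟨P, hP, hc⟩ := mu_achieved L R
  obtain ⟨hf, hs, hprop⟩ := hP
  by_cases hsex : ∃ p ∈ P, p.2 = l - 1
  · obtain ⟨p, hpP, hpr⟩ := hsex
    have hfl : p.1 ∈ L := by
      have : p.1 ∈ P.map Prod.fst := Multiset.mem_map.mpr ⟨p, hpP, rfl⟩
      simpa using Multiset.mem_of_le hf this
    have hpl : p.1 = l := by
      rcases hprop p hpP with h | h
      · have : p.1 = l - 2 := by omega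
        have := hmin _ hfl
        omega
      · omega
    have := mu_remove_pair_fst ⟨hf, hs, hprop⟩ hc hpP hpl
    rwa [hpr] at this
  · have hscnt : (P.map Prod.snd).count (l-1) = 0 := by
      rw [Multiset.count_eq_zero]
      intro hmem
      obtain ⟨q, hq, hqr⟩ := Multiset.mem_map.mp hmem
      exact hsex ⟨q, hq, hqr⟩
    by_cases hlt : (P.map Prod.fst).count l < ((L : Multiset Int)).count l
    · exfalso
      have hM : IsM ((l, l - 1) ::ₘ P) L R := by
        refine ⟨?_, ?_, ?_⟩
        · rw [Multiset.map_cons]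
          exact ms_cons_le_of_lt hf hlt
        · rw [Multiset.map_cons]
          apply ms_cons_le_of_lt hs
          rw [hscnt]
          have hrm : (l - 1) ∈ (R : Multiset Int) := by simpa using h1
          simpa using Multiset.count_pos.mpr hrm
        · intro p hp
          rcases Multiset.mem_cons.mp hp with rfl | hp
          · right; rfl
          · exact hprop p hp
      have := mu_ub L R _ hM
      simp only [Multiset.card_cons, hc] at this
      omega
    · have hcpos : 0 < (P.map Prod.fst).count l := by
        have h1' := Multiset.count_le_of_le l hf
        have hlm : l ∈ (L : Multiset Int) := by simpa using hl
        have := Multiset.count_pos.mpr hlm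
        omega
      obtain ⟨p, hpP, hpl⟩ := Multiset.mem_map.mp (Multiset.count_pos.mp hcpos)
      have hp2 : p.2 = l + 1 := by
        rcases hprop p hpP with h | h
        · rw [h, hpl]
        · exfalso; exact hsex ⟨p, hpP, by rw [h, hpl]⟩
      -- remove (l, l+1) from P; the remainder avoids l and l-1 entirely
      have hdecomp : P = p ::ₘ P.erase p := (Multiset.cons_erase hpP).symm
      set Q := P.erase p with hQ
      have hfst' : Q.map Prod.fst ≤ ((L.erase l : List Int) : Multiset Int) := by
        rw [← Multiset.coe_erase]
        apply ms_cons_le_erase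
        rw [← hpl, ← Multiset.map_cons, ← hdecomp]
        exact hf
      have hsnd' : Q.map Prod.snd ≤ ((R.erase (l-1) : List Int) : Multiset Int) := by
        rw [← Multiset.coe_erase]
        apply ms_le_erase_of_count_zero
        · exact le_trans (Multiset.map_le_map (Multiset.erase_le p P)) hs
        · have : (Q.map Prod.snd).count (l-1) ≤ (P.map Prod.snd).count (l-1) :=
            Multiset.count_le_of_le _ (Multiset.map_le_map (Multiset.erase_le p P))
          omega
      have hub := mu_ub _ _ Q ⟨hfst', hsnd', fun q hq => hprop q (Multiset.mem_of_le (Multiset.erase_le p P) hq)⟩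
      have hmono := mu_mono_pair hl h1 (Or.inr rfl)
      have hcard : Multiset.card P = Multiset.card Q + 1 := by rw [hdecomp]; simp [hQ]
      omega

theorem mu_min_right {L R : List Int} {l : Int} (hl : l ∈ L)
    (h1 : (l - 1) ∉ R) (h2 : (l + 1) ∈ R) :
    mu L R = mu (L.erase l) (R.erase (l + 1)) + 1 := by
  obtain ⟨P, hP, hc⟩ := mu_achieved L R
  obtain ⟨hf, hs, hprop⟩ := hP
  by_cases hfex : ∃ p ∈ P, p.1 = l
  · obtain ⟨p, hpP, hpl⟩ := hfex
    have hr : p.2 ∈ R := by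
      have : p.2 ∈ P.map Prod.snd := Multiset.mem_map.mpr ⟨p, hpP, rfl⟩
      simpa using Multiset.mem_of_le hs this
    have hp2 : p.2 = l + 1 := by
      rcases hprop p hpP with h | h
      · rw [h, hpl]
      · exfalso; apply h1; rwa [h, hpl] at hr
    have := mu_remove_pair_fst ⟨hf, hs, hprop⟩ hc hpP hpl
    rwa [hp2] at this
  · have hcnt : (P.map Prod.fst).count l = 0 := by
      rw [Multiset.count_eq_zero]
      intro hmem
      obtain ⟨q, hq, hql⟩ := Multiset.mem_map.mp hmem
      exact hfex ⟨q, hq, hql⟩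
    by_cases hlt : (P.map Prod.snd).count (l+1) < ((R : Multiset Int)).count (l+1)
    · exfalso
      have hM : IsM ((l, l + 1) ::ₘ P) L R := by
        refine ⟨?_, ?_, ?_⟩
        · rw [Multiset.map_cons]
          apply ms_cons_le_of_lt hf
          rw [hcnt]
          have hlm : l ∈ (L : Multiset Int) := by simpa using hl
          simpa using Multiset.count_pos.mpr hlm
        · rw [Multiset.map_cons]
          exact ms_cons_le_of_lt hs hlt
        · intro p hp
          rcases Multiset.mem_cons.mp hp with rfl | hp
          · left; rfl
          · exact hprop p hp
      have := mu_ub L R _ hM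
      simp only [Multiset.card_cons, hc] at this
      omega
    · have hcpos : 0 < (P.map Prod.snd).count (l+1) := by
        have h1' := Multiset.count_le_of_le (l+1) hs
        have hrm : (l + 1) ∈ (R : Multiset Int) := by simpa using h2
        have := Multiset.count_pos.mpr hrm
        omega
      obtain ⟨p, hpP, hpr⟩ := Multiset.mem_map.mp (Multiset.count_pos.mp hcpos)
      have hdecomp : P = p ::ₘ P.erase p := (Multiset.cons_erase hpP).symm
      set Q := P.erase p with hQ
      have hfst' : Q.map Prod.fst ≤ ((L.erase l : List Int) : Multiset Int) := by
        rw [← Multiset.coe_erase]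
        apply ms_le_erase_of_count_zero
        · exact le_trans (Multiset.map_le_map (Multiset.erase_le p P)) hf
        · have : (Q.map Prod.fst).count l ≤ (P.map Prod.fst).count l :=
            Multiset.count_le_of_le _ (Multiset.map_le_map (Multiset.erase_le p P))
          omega
      have hsnd' : Q.map Prod.snd ≤ ((R.erase (l+1) : List Int) : Multiset Int) := by
        rw [← Multiset.coe_erase]
        apply ms_cons_le_erase
        rw [← hpr, ← Multiset.map_cons, ← hdecomp]
        exact hs
      have hub := mu_ub _ _ Q ⟨hfst', hsnd', fun q hq => hprop q (Multiset.mem_of_le (Multiset.erase_le p P) hq)⟩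
      have hmono := mu_mono_pair hl h2 (Or.inl rfl)
      have hcard : Multiset.card P = Multiset.card Q + 1 := by rw [hdecomp]; simp [hQ]
      omega

theorem greedy_inv (S : List Int) : ∀ (R : List Int) (m : Int), S.Pairwise (· ≤ ·) →
    (S.foldl (fun (st : List Int × Int) v =>
      if (v - 1) ∈ st.1 then ((PySem.List.remove? st.1 (v-1)).getD st.1, st.2)
      else if (v + 1) ∈ st.1 then ((PySem.List.remove? st.1 (v+1)).getD st.1, st.2)
      else (st.1, st.2 + 1)) (R, m)).2 = m + (S.length : Int) - mu S R := by
  induction S with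
  | nil => intro R m _; simp [mu]
  | cons v T ih =>
    intro R m hp
    have hmin : ∀ x ∈ v :: T, v ≤ x := by
      intro x hx
      rcases List.mem_cons.mp hx with rfl | hx
      · exact le_refl _
      · exact (List.pairwise_cons.mp hp).1 x hx
    have hpT : T.Pairwise (· ≤ ·) := (List.pairwise_cons.mp hp).2
    rw [List.foldl_cons]
    by_cases h1 : (v - 1) ∈ R
    · simp only [if_pos h1, PySem.List.remove?_eq_some_erase R _ h1, Option.getD_some]
      rw [ih (R.erase (v-1)) m hpT]
      have := mu_min_left (L := v :: T) (List.mem_cons_self) hmin h1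
      rw [List.erase_cons_head] at this
      rw [this]
      push_cast
      have := mu_le_len T (R.erase (v-1))
      simp only [List.length_cons]
      push_cast
      omega
    · by_cases h2 : (v + 1) ∈ R
      · simp only [if_neg h1, if_pos h2, PySem.List.remove?_eq_some_erase R _ h2, Option.getD_some]
        rw [ih (R.erase (v+1)) m hpT]
        have := mu_min_right (L := v :: T) (List.mem_cons_self) h1 h2
        rw [List.erase_cons_head] at this
        rw [this]
        simp only [List.length_cons]
        push_cast
        omega
      · simp only [if_neg h1, if_neg h2]
        rw [ih R (m+1) hpT]
        have := mu_noedge (L := v :: T) (l := v) h1 h2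
        rw [List.erase_cons_head] at this
        rw [this]
        simp only [List.length_cons]
        push_cast
        omega

def MRSpec (n : Int) (d : Nat) : Prop := ∀ (L R : List Int) (c : Int), L.length = d →
  (pvMaxRet n d L R c).1.Perm L ∧ (pvMaxRet n d L R c).2.1.Perm R ∧
  (pvMaxRet n d L R c).2.2 = if mu L R = 0 then c else max c (n - L.length + mu L R)

def pvBranch (n : Int) (sub : List Int → List Int → Int → List Int × List Int × Int)
    (l r : Int) (s : List Int × List Int × Int) : List Int × List Int × Int :=
  if r ∈ s.2.1 then
    pvAfter n l r (sub ((PySem.List.remove? s.1 l).getD s.1)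
      ((PySem.List.remove? s.2.1 r).getD s.2.1) s.2.2)
  else s

def LoopSpecF (n : Int) (sub : List Int → List Int → Int → List Int × List Int × Int)
    (k i : Nat) (L R : List Int) (c : Int) : Prop :=
  (pvLoopF n sub k i L R c).1.Perm L ∧ (pvLoopF n sub k i L R c).2.1.Perm R ∧
  c ≤ (pvLoopF n sub k i L R c).2.2 ∧
  (pvLoopF n sub k i L R c).2.2 ≤ max c (n - L.length + mu L R) ∧
  ((∃ j, ∃ hj : j < L.length, i ≤ j ∧ pvEdged (L[j]'hj) R) →
      n - L.length + mu L R ≤ (pvLoopF n sub k i L R c).2.2) ∧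
  ((∀ x ∈ L, ¬ pvEdged x R) → pvLoopF n sub k i L R c = (L, R, c))

theorem pvLoopF_succ (n : Int) (sub : List Int → List Int → Int → List Int × List Int × Int)
    (k i : Nat) (L R : List Int) (c : Int) (hi : i < L.length) :
    pvLoopF n sub (k+1) i L R c =
      (fun s2 => pvLoopF n sub k (i+1) s2.1 s2.2.1 s2.2.2)
        (pvBranch n sub (L[i]'hi) ((L[i]'hi) - 1) (pvBranch n sub (L[i]'hi) ((L[i]'hi) + 1) (L, R, c))) := by
  rw [pvLoopF]
  simp only [dif_pos hi, pvBranch]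

theorem pvBranch_not_mem {n : Int} {sub : List Int → List Int → Int → List Int × List Int × Int}
    {l r : Int} {s : List Int × List Int × Int}
    (h : r ∉ s.2.1) : pvBranch n sub l r s = s := by
  simp [pvBranch, h]

theorem pvAfter_cnt (n l r : Int) (t : List Int × List Int × Int) :
    (pvAfter n l r t).2.2 = max t.2.2 (n - t.1.length) := by
  simp only [pvAfter]
  by_cases h : n - (t.1.length : Int) ≤ t.2.2
  · rw [if_neg (by omega), max_eq_left h]
  · push Not at h
    rw [if_pos h, max_eq_right h.le]

theorem pvBranch_spec (n : Int) (d : Nat) {L R : List Int} {l r : Int}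
    (s : List Int × List Int × Int)
    (hsL : s.1.Perm L) (hsR : s.2.1.Perm R) (hlen : L.length = d + 1)
    (hl : l ∈ s.1) (he : r = l + 1 ∨ r = l - 1) (hsub : MRSpec n d) :
    (pvBranch n (pvMaxRet n d) l r s).1.Perm L ∧ (pvBranch n (pvMaxRet n d) l r s).2.1.Perm R ∧
    s.2.2 ≤ (pvBranch n (pvMaxRet n d) l r s).2.2 ∧
    (pvBranch n (pvMaxRet n d) l r s).2.2 ≤ max s.2.2 (n - L.length + mu L R) ∧
    (r ∈ R → n - L.length + (1 + (mu (L.erase l) (R.erase r) : Int)) ≤ (pvBranch n (pvMaxRet n d) l r s).2.2) := by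
  by_cases hr : r ∈ s.2.1
  · have hrR : r ∈ R := hsR.mem_iff.mp hr
    have hlL : l ∈ L := hsL.mem_iff.mp hl
    have hunf : pvBranch n (pvMaxRet n d) l r s =
        pvAfter n l r (pvMaxRet n d (s.1.erase l) (s.2.1.erase r) s.2.2) := by
      rw [pvBranch, if_pos hr,
        PySem.List.remove?_eq_some_erase s.1 l hl, PySem.List.remove?_eq_some_erase s.2.1 r hr]
      rfl
    have hL1len : (s.1.erase l).length = d := by
      rw [List.length_erase_of_mem hl, hsL.length_eq, hlen]
      omega
    obtain ⟨ht1, ht2, hval⟩ := hsub (s.1.erase l) (s.2.1.erase r) s.2.2 hL1len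
    set t := pvMaxRet n d (s.1.erase l) (s.2.1.erase r) s.2.2 with hts
    have hpL1 : (s.1.erase l).Perm (L.erase l) := hsL.erase l
    have hpR1 : (s.2.1.erase r).Perm (R.erase r) := hsR.erase r
    have hmuEq : mu (s.1.erase l) (s.2.1.erase r) = mu (L.erase l) (R.erase r) := mu_perm hpL1 hpR1
    have hmono := mu_mono_pair hlL hrR he
    have houtc : (pvBranch n (pvMaxRet n d) l r s).2.2 = max t.2.2 (n - t.1.length) := by
      rw [hunf, pvAfter_cnt]
    have htlen : t.1.length = d := by rw [ht1.length_eq, hL1len]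
    have htc : s.2.2 ≤ t.2.2 := by
      rw [hval]; split_ifs
      · exact le_refl _
      · exact le_max_left _ _
    have hperm1 : (pvBranch n (pvMaxRet n d) l r s).1.Perm L := by
      rw [hunf]
      exact (List.perm_append_singleton _ _).trans
        (((List.Perm.cons l ht1).trans (List.perm_cons_erase hl).symm).trans hsL)
    have hperm2 : (pvBranch n (pvMaxRet n d) l r s).2.1.Perm R := by
      rw [hunf]
      exact (List.perm_append_singleton _ _).trans
        (((List.Perm.cons r ht2).trans (List.perm_cons_erase hr).symm).trans hsR)
    have hsd : ((s.1.erase l).length : Int) = (d : Int) := by rw [hL1len]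
    have htd : ((t.1.length : Nat) : Int) = (d : Int) := by rw [htlen]
    have hLd : ((L.length : Nat) : Int) = (d : Int) + 1 := by rw [hlen]; push_cast; ring
    refine ⟨hperm1, hperm2, ?_, ?_, ?_⟩
    · rw [houtc]
      exact le_trans htc (le_max_left _ _)
    · rw [houtc]
      apply max_le
      · rw [hval]
        split_ifs with h0
        · exact le_max_left _ _
        · apply max_le (le_max_left _ _)
          apply le_max_of_le_right
          rw [hsd, hmuEq, hLd]
          omega
      · apply le_max_of_le_right
        rw [htd, hLd]
        omega
    · intro _
      rw [houtc]
      by_cases hmu0 : mu (s.1.erase l) (s.2.1.erase r) = 0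
      · apply le_max_of_le_right
        rw [htd, hLd]
        rw [hmu0] at hmuEq
        omega
      · apply le_max_of_le_left
        rw [hval, if_neg hmu0]
        apply le_max_of_le_right
        rw [hsd, hmuEq, hLd]
        omega
  · rw [pvBranch_not_mem hr]
    refine ⟨hsL, hsR, le_refl _, le_max_left _ _, fun hrR => absurd (hsR.mem_iff.mpr hrR) hr⟩

theorem pvMR_main (n : Int) : ∀ d, MRSpec n d := by
  intro d
  induction d with
  | zero =>
    intro L R c hlen
    have hL : L = [] := List.eq_nil_of_length_eq_zero hlen
    subst hL
    exact ⟨List.Perm.refl _, List.Perm.refl _, by simp [pvMaxRet, mu]⟩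
  | succ d ihd =>
    have hloop : ∀ k i (L R : List Int) (c : Int), L.length = d + 1 → i + k = d + 1 →
        LoopSpecF n (pvMaxRet n d) k i L R c := by
      intro k
      induction k with
      | zero =>
        intro i L R c hlen hik
        unfold LoopSpecF
        rw [pvLoopF]
        refine ⟨List.Perm.refl _, List.Perm.refl _, le_refl _, le_max_left _ _, ?_, fun _ => rfl⟩
        rintro ⟨j, hj, hij, -⟩
        omega
      | succ k' ihk =>
        intro i L R c hlen hik
        have hi : i < L.length := by omega
        set l := L[i]'hi with hldef
        have hlmem : l ∈ L := List.getElem_mem hi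
        obtain ⟨hb1L, hb1R, hb1c, hb1ub, hb1lb⟩ :=
          pvBranch_spec n d (L, R, c) (List.Perm.refl _) (List.Perm.refl _) hlen hlmem
            (Or.inl rfl) ihd
        set s1 := pvBranch n (pvMaxRet n d) l (l+1) (L, R, c) with hs1
        obtain ⟨hb2L, hb2R, hb2c, hb2ub, hb2lb⟩ :=
          pvBranch_spec n d s1 hb1L hb1R hlen (hb1L.mem_iff.mpr hlmem) (Or.inr rfl) ihd
        set s2 := pvBranch n (pvMaxRet n d) l (l-1) s1 with hs2
        have hunf : pvLoopF n (pvMaxRet n d) (k'+1) i L R c =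
            pvLoopF n (pvMaxRet n d) k' (i+1) s2.1 s2.2.1 s2.2.2 := by
          rw [pvLoopF_succ n (pvMaxRet n d) k' i L R c hi]
        obtain ⟨htL, htR, htc, htub, htlb, htne⟩ :=
          ihk (i+1) s2.1 s2.2.1 s2.2.2 (by rw [hb2L.length_eq, hlen]) (by omega)
        have hmu2 : mu s2.1 s2.2.1 = mu L R := mu_perm hb2L hb2R
        have hlen2 : s2.1.length = L.length := hb2L.length_eq
        rw [hmu2, hlen2] at htub
        rw [hmu2] at htlb
        unfold LoopSpecF
        rw [hunf]
        refine ⟨htL.trans hb2L, htR.trans hb2R, ?_, ?_, ?_, ?_⟩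
        · exact le_trans (le_trans hb1c hb2c) htc
        · have h2' : s2.2.2 ≤ max c (n - L.length + mu L R) :=
            le_trans hb2ub (max_le hb1ub (le_max_right _ _))
          exact le_trans htub (max_le h2' (le_max_right _ _))
        · rintro ⟨j, hj, hij, hje⟩
          by_cases hedge : pvEdged l R
          · obtain ⟨r, hre, hrR, hxch⟩ := mu_exchange hlmem hedge
            rcases hre with rfl | rfl
            · have := hb1lb hrR
              have hch : (n : Int) - L.length + mu L R ≤ s1.2.2 := by
                rw [hxch]; push_cast; push_cast at this; omega
              exact le_trans hch (le_trans hb2c htc)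
            · have := hb2lb hrR
              have hch : (n : Int) - L.length + mu L R ≤ s2.2.2 := by
                rw [hxch]; push_cast; push_cast at this; omega
              exact le_trans hch htc
          · have h1m : (l+1) ∉ R := fun h => hedge (Or.inl h)
            have h2m : (l-1) ∉ R := fun h => hedge (Or.inr h)
            have hs1id : s1 = (L, R, c) := by rw [hs1]; exact pvBranch_not_mem h1m
            have hs2id : s2 = (L, R, c) := by rw [hs2, hs1id]; exact pvBranch_not_mem h2m
            rw [hs2id] at htlb ⊢
            apply htlb
            refine ⟨j, hj, ?_, hje⟩
            have : j ≠ i := by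
              intro hji
              subst hji
              exact hedge (by rwa [hldef])
            omega
        · intro hne
          have hedge : ¬ pvEdged l R := hne l hlmem
          have h1m : (l+1) ∉ R := fun h => hedge (Or.inl h)
          have h2m : (l-1) ∉ R := fun h => hedge (Or.inr h)
          have hs1id : s1 = (L, R, c) := by rw [hs1]; exact pvBranch_not_mem h1m
          have hs2id : s2 = (L, R, c) := by rw [hs2, hs1id]; exact pvBranch_not_mem h2m
          rw [hs2id] at htne ⊢
          exact htne hne
    intro L R c hlen
    have hrw : pvMaxRet n (d+1) L R c = pvLoopF n (pvMaxRet n d) L.length 0 L R c := rfl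
    obtain ⟨hL, hR, hc, hub, hlb, hne⟩ := hloop L.length 0 L R c hlen (by omega)
    refine ⟨by rw [hrw]; exact hL, by rw [hrw]; exact hR, ?_⟩
    rw [hrw]
    by_cases hmu : mu L R = 0
    · rw [if_pos hmu]
      have hno : ∀ x ∈ L, ¬ pvEdged x R := by
        intro x hx hxe
        obtain ⟨r, -, -, hx2⟩ := mu_exchange hx hxe
        omega
      rw [hne hno]
    · rw [if_neg hmu]
      obtain ⟨x, hx, hxe⟩ := mu_pos hmu
      obtain ⟨j, hj, hxj⟩ := List.mem_iff_getElem.mp hx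
      have hlb' := hlb ⟨j, hj, by omega, by rwa [hxj]⟩
      exact le_antisymm hub (max_le hc hlb')

theorem solution_eq_mu (n : Int) (lost reserve : List Int) :
    solution n lost reserve =
      n - (pvDedup lost reserve).1.length +
        mu (pvDedup lost reserve).1 (pvDedup lost reserve).2 := by
  show (pvMaxRet n (pvDedup lost reserve).1.length (pvDedup lost reserve).1
      (pvDedup lost reserve).2 (n - (pvDedup lost reserve).1.length)).2.2 = _
  obtain ⟨-, -, hval⟩ := pvMR_main n (pvDedup lost reserve).1.length
    (pvDedup lost reserve).1 (pvDedup lost reserve).2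
    (n - (pvDedup lost reserve).1.length) rfl
  rw [hval]
  split_ifs with h
  · rw [h]; simp
  · rw [max_eq_right]
    omega

theorem solution_alt_eq_mu (n : Int) (lost reserve : List Int) :
    solution_alt n lost reserve =
      n - (pvDedup lost reserve).1.length +
        mu (pvDedup lost reserve).1 (pvDedup lost reserve).2 := by
  have hd : pvDedupB lost reserve = pvDedup lost reserve := rfl
  show n - ((PySem.List.sorted (pvDedupB lost reserve).1 (fun x => x) false).foldl
      (fun (st : List Int × Int) v =>
        if (v - 1) ∈ st.1 then ((PySem.List.remove? st.1 (v-1)).getD st.1, st.2)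
        else if (v + 1) ∈ st.1 then ((PySem.List.remove? st.1 (v+1)).getD st.1, st.2)
        else (st.1, st.2 + 1)) ((pvDedupB lost reserve).2, (0 : Int))).2 = _
  rw [hd]
  rw [greedy_inv _ _ _ (by simpa using PySem.List.sorted_pairwise (pvDedup lost reserve).1 (fun x => x))]
  have hperm := PySem.List.sorted_perm (pvDedup lost reserve).1 (fun x => x) false
  rw [mu_perm hperm (List.Perm.refl (pvDedup lost reserve).2), hperm.length_eq]
  omega

-- ===== VERDICT (by name: the statement is the Claim_ definition above) =====
theorem solution_spec : Claim_equal_solution := by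
  intro n lost reserve _
  unfold Spec_solution
  rw [solution_eq_mu, solution_alt_eq_mu]
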